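-- pv_equiv track=rewrite | github.com/alextdr2016-ux/ejolie-openclaw-agent | ejolie-sales/scripts/specs_audit_and_fill.py | find_closest_value
-- ===== SOURCE A (Python) =====
-- def find_closest_value(value, valid_list):
--     """Gaseste cea mai apropiata valoare din lista valida"""
--     value_lower = value.lower().strip()
--     for valid in valid_list:
--         if valid.lower() == value_lower:
--             return valid
--     # Cautare partiala
--     for valid in valid_list:
--         if value_lower in valid.lower() or valid.lower() in value_lower:
--             return valid
--     return None
-- ===== SOURCE B (Python) =====
-- def find_closest_value(value, valid_list):
--     """Gaseste cea mai apropiata valoare din lista valida (single pass)."""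
--     value_lower = value.lower().strip()
--     first_partial = None
--     for valid in valid_list:
--         vl = valid.lower()
--         if vl == value_lower:
--             return valid
--         if first_partial is None and (value_lower in vl or vl in value_lower):
--             first_partial = valid
--     return first_partial
-- ===== Notes on version B (the rewrite author's own statement) =====
-- stated objective: simpler
-- what changed: Replaces A's two sequential scans (exact-match pass, then substring pass) with one stateful pass that returns on an exact match and remembers the first partial match in an accumulator.
import Mathlib
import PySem

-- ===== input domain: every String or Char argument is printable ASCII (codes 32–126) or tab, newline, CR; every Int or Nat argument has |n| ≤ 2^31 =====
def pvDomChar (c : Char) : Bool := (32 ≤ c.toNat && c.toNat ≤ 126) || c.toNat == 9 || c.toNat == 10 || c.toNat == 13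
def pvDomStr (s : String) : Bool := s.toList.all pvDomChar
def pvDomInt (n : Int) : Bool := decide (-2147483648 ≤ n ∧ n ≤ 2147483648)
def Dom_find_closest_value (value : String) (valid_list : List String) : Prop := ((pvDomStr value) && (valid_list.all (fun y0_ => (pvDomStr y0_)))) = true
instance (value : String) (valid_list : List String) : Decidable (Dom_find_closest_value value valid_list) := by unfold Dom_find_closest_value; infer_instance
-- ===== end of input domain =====

-- ===== PORT A =====
def find_closest_value (value : String) (valid_list : List String) : Option String :=
  let value_lower := PySem.Str.strip (PySem.Str.lower value)
  match valid_list.find? (fun valid => PySem.Str.lower valid == value_lower) with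
  | some v => some v
  | none =>
    valid_list.find? (fun valid =>
      PySem.Str.isIn value_lower (PySem.Str.lower valid) ||
      PySem.Str.isIn (PySem.Str.lower valid) value_lower)

-- ===== PORT B =====
def altLoop (value_lower : String) (first_partial : Option String) : List String → Option String
  | [] => first_partial
  | valid :: rest =>
    let vl := PySem.Str.lower valid
    if vl == value_lower then some valid
    else if first_partial.isNone &&
            (PySem.Str.isIn value_lower vl || PySem.Str.isIn vl value_lower) then
      altLoop value_lower (some valid) rest
    else
      altLoop value_lower first_partial rest

def find_closest_value_alt (value : String) (valid_list : List String) : Option String :=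
  altLoop (PySem.Str.strip (PySem.Str.lower value)) none valid_list

-- ===== PRECONDITION & SPEC =====
def Spec_find_closest_value (value : String) (valid_list : List String) (out : Option String) : Prop := out = find_closest_value_alt value valid_list
instance (value : String) (valid_list : List String) (out : Option String) : Decidable (Spec_find_closest_value value valid_list out) := by unfold Spec_find_closest_value; infer_instance

-- ===== CLAIM (what is proved, stated in full; the proofs are below) =====
def Claim_equal_find_closest_value : Prop := ∀ (value : String) (valid_list : List String), Dom_find_closest_value value valid_list → Spec_find_closest_value value valid_list (find_closest_value value valid_list)

-- ===== LEMMAS AND PROOFS =====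
-- B collapses A's two scans into one pass carrying the first partial match; proved equal via loop lemmas.

-- ===== VERDICT (by name: the statement is the Claim_ definition above) =====
-- With a partial match already recorded, the loop only looks for an exact match.
theorem altLoop_some (vl x : String) (l : List String) :
    altLoop vl (some x) l =
      match l.find? (fun v => PySem.Str.lower v == vl) with
      | some v => some v
      | none => some x := by
  induction l with
  | nil => simp [altLoop]
  | cons v rest ih =>
    simp only [altLoop, List.find?]
    by_cases h : (PySem.Str.lower v == vl) = true
    · simp [h]
    · simp [h, ih]

theorem altLoop_none (vl : String) (l : List String) :
    altLoop vl none l =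
      match l.find? (fun v => PySem.Str.lower v == vl) with
      | some v => some v
      | none => l.find? (fun v => PySem.Str.isIn vl (PySem.Str.lower v) ||
                                  PySem.Str.isIn (PySem.Str.lower v) vl) := by
  induction l with
  | nil => simp [altLoop]
  | cons v rest ih =>
    simp only [altLoop, List.find?]
    by_cases h : (PySem.Str.lower v == vl) = true
    · simp [h]
    · by_cases h1 : PySem.Chars.isIn vl.toList (PySem.Chars.lower v.toList) = true
      all_goals by_cases h2 : PySem.Chars.isIn (PySem.Chars.lower v.toList) vl.toList = true
      all_goals simp [h, h1, h2, altLoop_some, ih, PySem.Str.isIn]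

theorem find_closest_value_spec : Claim_equal_find_closest_value := by
  intro value valid_list _
  show find_closest_value value valid_list = find_closest_value_alt value valid_list
  simp only [find_closest_value, find_closest_value_alt, altLoop_none]
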